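-- pv_equiv track=rewrite | github.com/kingaurelio1/PythonCodes | __pycache__/removemiddleelement.py | RemovingMiddle
-- ===== SOURCE A (Python) =====
-- def RemovingMiddle(a):
--     l=0
--     r=1
--     middle=(len(a)-1)//2
--     while r<len(a):
--         if middle<=l:
--             a[l],a[r]=a[r],a[l]
--             l+=1
--             r+=1
--         else:
--             l+=1
--             r+=1
--     a.pop()
--     return a
-- ===== SOURCE B (Python) =====
-- def RemovingMiddle(a):
--     middle = (len(a) - 1) // 2
--     a.pop(middle)
--     return a
-- ===== Notes on version B (the rewrite author's own statement) =====
-- stated objective: simpler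
-- what changed: Replaces the swap-bubbling while loop (which moves the middle element to the end by repeated adjacent swaps before popping the last element) with a single direct indexed removal a.pop((len(a)-1)//2).
import Mathlib
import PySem

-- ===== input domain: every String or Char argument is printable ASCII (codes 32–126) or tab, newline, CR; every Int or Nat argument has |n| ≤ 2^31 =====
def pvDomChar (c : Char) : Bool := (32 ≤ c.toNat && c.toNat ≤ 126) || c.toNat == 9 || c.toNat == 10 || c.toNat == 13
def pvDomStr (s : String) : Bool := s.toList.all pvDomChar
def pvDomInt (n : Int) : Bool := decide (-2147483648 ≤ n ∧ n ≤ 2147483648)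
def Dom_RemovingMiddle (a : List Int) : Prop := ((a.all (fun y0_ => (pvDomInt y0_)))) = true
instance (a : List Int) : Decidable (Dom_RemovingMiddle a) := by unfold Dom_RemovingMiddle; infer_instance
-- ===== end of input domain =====

-- B replaces A's swap-bubbling loop with a single indexed pop at (len(a)-1)//2; both mutate the
-- argument list in Python with the same final contents; the proof is about the return value.


-- ===== PORT A =====
-- the while loop: state (l, r=l+1) over the list; swaps a[l],a[r] once middle ≤ l
def RemovingMiddleLoop (middle : Int) (l r : Nat) (a : List Int) : List Int :=
  if _h : r < a.length then
    if middle ≤ (l : Int) then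
      RemovingMiddleLoop middle (l + 1) (r + 1) ((a.set l (a.getD r 0)).set r (a.getD l 0))
    else
      RemovingMiddleLoop middle (l + 1) (r + 1) a
  else a
termination_by a.length - r
decreasing_by
  · simp [List.length_set]; omega
  · omega

def RemovingMiddle (a : List Int) : List Int :=
  (RemovingMiddleLoop (PySem.Int.floordiv ((a.length : Int) - 1) 2) 0 1 a).dropLast

-- ===== PORT B =====
def RemovingMiddle_alt (a : List Int) : List Int :=
  match PySem.List.pop? a (PySem.Int.floordiv ((a.length : Int) - 1) 2) with
  | some (_, rest) => rest
  | none => []  -- unreachable under Pre_ (a.pop raises IndexError only on the empty list)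

-- ===== PRECONDITION & SPEC =====
-- Pre_ excludes only the empty list, on which A's a.pop() raises IndexError.
def Pre_RemovingMiddle (a : List Int) : Prop := a ≠ []
instance (a : List Int) : Decidable (Pre_RemovingMiddle a) := by unfold Pre_RemovingMiddle; infer_instance
def pvWitness_RemovingMiddle : List Int := [3, 1, 4]
def Spec_RemovingMiddle (a : List Int) (out : List Int) : Prop := out = RemovingMiddle_alt a
instance (a : List Int) (out : List Int) : Decidable (Spec_RemovingMiddle a out) := by unfold Spec_RemovingMiddle; infer_instance

-- ===== CLAIM (what is proved, stated in full; the proofs are below) =====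
def Claim_equal_RemovingMiddle : Prop := ∀ (a : List Int), Dom_RemovingMiddle a → Pre_RemovingMiddle a → Spec_RemovingMiddle a (RemovingMiddle a)

-- ===== LEMMAS AND PROOFS =====

theorem pv_getD_append (p : List Int) (x : Int) (t : List Int) :
    (p ++ x :: t).getD p.length 0 = x := by
  induction p with
  | nil => rfl
  | cons h tl ih => simpa using ih

theorem pv_set_append (p : List Int) (x v : Int) (t : List Int) :
    (p ++ x :: t).set p.length v = p ++ v :: t := by
  induction p with
  | nil => rfl
  | cons h tl ih => simpa using ih

-- swap phase: once l has reached middle, the loop bubbles x to the end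
theorem pv_phase2 (t : List Int) : ∀ (p : List Int) (x : Int) (m : Int), m ≤ (p.length : Int) →
    RemovingMiddleLoop m p.length (p.length + 1) (p ++ x :: t) = p ++ t ++ [x] := by
  induction t with
  | nil =>
    intro p x m hm
    rw [RemovingMiddleLoop]
    simp
  | cons y t' ih =>
    intro p x m hm
    rw [RemovingMiddleLoop]
    have hlen : p.length + 1 < (p ++ x :: y :: t').length := by simp
    rw [dif_pos hlen, if_pos hm]
    have h1 : (p ++ x :: y :: t').getD (p.length + 1) 0 = y := by
      have := pv_getD_append (p ++ [x]) y t'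
      simpa using this
    have h2 : (p ++ x :: y :: t').getD p.length 0 = x := pv_getD_append p x (y :: t')
    have h3 : (p ++ x :: y :: t').set p.length y = p ++ y :: y :: t' :=
      pv_set_append p x y (y :: t')
    have h4 : (p ++ y :: y :: t').set (p.length + 1) x = p ++ y :: x :: t' := by
      have := pv_set_append (p ++ [y]) y x t'
      simpa using this
    rw [h1, h2, h3, h4]
    have := ih (p ++ [y]) x m (by simp; omega)
    simpa [List.append_assoc] using this

-- counting phase: while l < middle, nothing happens but the counters
theorem pv_main (a : List Int) (mid : Nat) (hmid : mid < a.length) : ∀ (n l : Nat), mid - l = n → l ≤ mid →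
    RemovingMiddleLoop (mid : Int) l (l + 1) a =
      a.take mid ++ a.drop (mid + 1) ++ [a.getD mid 0] := by
  intro n
  induction n with
  | zero =>
    intro l hd hl
    rw [show l = mid from by omega]
    have hdecomp : a = a.take mid ++ a.getD mid 0 :: a.drop (mid + 1) := by
      conv_lhs => rw [← List.take_append_drop mid a]
      congr 1
      rw [List.getD_eq_getElem?_getD, List.getElem?_eq_getElem hmid]
      exact (List.drop_eq_getElem_cons hmid).symm ▸ rfl
    have hlen : (a.take mid).length = mid := by simp; omega
    calc RemovingMiddleLoop (mid : Int) mid (mid + 1) a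
        = RemovingMiddleLoop (mid : Int) (a.take mid).length ((a.take mid).length + 1)
            (a.take mid ++ a.getD mid 0 :: a.drop (mid + 1)) := by rw [hlen, ← hdecomp]
      _ = a.take mid ++ a.drop (mid + 1) ++ [a.getD mid 0] :=
            pv_phase2 _ _ _ _ (by simp [hlen])
  | succ n ih =>
    intro l hd hl
    have hlm : l < mid := by omega
    rw [RemovingMiddleLoop]
    have hr : l + 1 < a.length := by omega
    rw [dif_pos hr, if_neg (by exact_mod_cast by omega)]
    exact ih (l + 1) (by omega) (by omega)

-- ===== VERDICT (by name: the statement is the Claim_ definition above) =====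
theorem RemovingMiddle_spec : Claim_equal_RemovingMiddle := by
  intro a _ hpre
  unfold Spec_RemovingMiddle RemovingMiddle RemovingMiddle_alt
  have hlen : 1 ≤ a.length := by
    cases a with
    | nil => exact absurd rfl hpre
    | cons _ _ => simp
  set mid := (a.length - 1) / 2 with hmiddef
  have hmidlt : mid < a.length := by omega
  have hcast : PySem.Int.floordiv ((a.length : Int) - 1) 2 = (mid : Int) := by
    have : ((a.length : Int) - 1) = ((a.length - 1 : Nat) : Int) := by omega
    rw [this]
    exact_mod_cast PySem.Int.floordiv_natCast (a.length - 1) 2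
  rw [hcast, pv_main a mid hmidlt mid 0 (by omega) (by omega)]
  rw [PySem.List.pop?_natCast a mid hmidlt]
  have : (a.take mid ++ a.drop (mid + 1) ++ [a.getD mid 0]).dropLast
      = a.take mid ++ a.drop (mid + 1) := by
    rw [List.dropLast_concat]
  rw [this, List.eraseIdx_eq_take_drop_succ]
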